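-- pv_equiv track=rewrite | github.com/xuedong/hacker-rank | Tutorials/Interview Preparation Kit/Search/Triple Sum/triple_sum.py | triplets
-- ===== SOURCE A (Python) =====
-- def triplets(a, b, c):
--     sorted_a = list(sorted(set(a)))
--     sorted_b = list(sorted(set(b)))
--     sorted_c = list(sorted(set(c)))
--     total = 0
--     ai = 0
--     bi = 0
--     ci = 0
--     while bi < len(sorted_b):
--         while ai < len(sorted_a) and sorted_a[ai] <= sorted_b[bi]:
--             ai += 1
--         while ci < len(sorted_c) and sorted_c[ci] <= sorted_b[bi]:
--             ci += 1
--         total += ai * ci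
--         bi += 1
--     return total
-- ===== SOURCE B (Python) =====
-- def _bisect_right(xs, x):
--     # CPython's bisect.bisect_right loop (hand-written: module A imports nothing)
--     lo, hi = 0, len(xs)
--     while lo < hi:
--         mid = (lo + hi) // 2
--         if x < xs[mid]:
--             hi = mid
--         else:
--             lo = mid + 1
--     return lo
--
--
-- def triplets(a, b, c):
--     sorted_a = sorted(set(a))
--     sorted_c = sorted(set(c))
--     total = 0
--     for v in sorted(set(b)):
--         total += _bisect_right(sorted_a, v) * _bisect_right(sorted_c, v)
--     return total
-- ===== Notes on version B (the rewrite author's own statement) =====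
-- stated objective: idiomatic
-- what changed: Replaces A's single monotonic two-pointer sweep (three indices advanced in lock-step across the b loop) with independent binary searches: for each distinct b-value, bisect_right into the prebuilt sorted unique a and c arrays counts the elements <= v directly.
import Mathlib
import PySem

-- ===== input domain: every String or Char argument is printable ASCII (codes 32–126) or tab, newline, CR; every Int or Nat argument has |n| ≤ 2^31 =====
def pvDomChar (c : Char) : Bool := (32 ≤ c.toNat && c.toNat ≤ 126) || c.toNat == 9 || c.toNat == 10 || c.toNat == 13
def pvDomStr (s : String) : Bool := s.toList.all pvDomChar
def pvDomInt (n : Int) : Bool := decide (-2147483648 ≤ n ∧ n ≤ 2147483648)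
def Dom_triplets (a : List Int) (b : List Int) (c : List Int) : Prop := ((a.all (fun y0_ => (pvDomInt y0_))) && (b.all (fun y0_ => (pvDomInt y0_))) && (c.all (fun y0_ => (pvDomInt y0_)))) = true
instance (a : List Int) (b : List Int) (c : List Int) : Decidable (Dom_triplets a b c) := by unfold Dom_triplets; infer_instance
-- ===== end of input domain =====

-- B replaces A's lock-step two-pointer sweep by an independent bisect_right per b-value (idiomatic; same cost).

-- ===== PORT A =====
-- inner 'while ai < len(sorted_a) and sorted_a[ai] <= v: ai += 1'
def advA (sa : List Int) (v : Int) (ai : Nat) : Nat :=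
  if h : ai < sa.length then
    if sa[ai] ≤ v then advA sa v (ai + 1) else ai
  else ai
termination_by sa.length - ai
decreasing_by omega

-- outer 'while bi < len(sorted_b)' loop carrying ai, ci, total
def loopA (sa sc : List Int) (bs : List Int) (ai ci : Nat) (total : Int) : Int :=
  match bs with
  | [] => total
  | v :: rest =>
      let ai' := advA sa v ai
      let ci' := advA sc v ci
      loopA sa sc rest ai' ci' (total + (ai' : Int) * (ci' : Int))

def triplets (a : List Int) (b : List Int) (c : List Int) : Int :=
  let sorted_a := PySem.List.sorted (PySem.Set.ofList a) (fun x => x)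
  let sorted_b := PySem.List.sorted (PySem.Set.ofList b) (fun x => x)
  let sorted_c := PySem.List.sorted (PySem.Set.ofList c) (fun x => x)
  loopA sorted_a sorted_c sorted_b 0 0 0

-- ===== PORT B =====
-- _bisect_right is CPython's bisect_right loop = PySem.List.bisectRight (exact)
def triplets_alt (a : List Int) (b : List Int) (c : List Int) : Int :=
  let sorted_a := PySem.List.sorted (PySem.Set.ofList a) (fun x => x)
  let sorted_c := PySem.List.sorted (PySem.Set.ofList c) (fun x => x)
  (PySem.List.sorted (PySem.Set.ofList b) (fun x => x)).foldl
    (fun total v =>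
      total + (PySem.List.bisectRight sorted_a v : Int) * (PySem.List.bisectRight sorted_c v : Int)) 0

-- ===== PRECONDITION & SPEC =====
def Spec_triplets (a : List Int) (b : List Int) (c : List Int) (out : Int) : Prop := out = triplets_alt a b c
instance (a : List Int) (b : List Int) (c : List Int) (out : Int) : Decidable (Spec_triplets a b c out) := by unfold Spec_triplets; infer_instance

-- ===== CLAIM (what is proved, stated in full; the proofs are below) =====
def Claim_equal_triplets : Prop := ∀ (a : List Int) (b : List Int) (c : List Int), Dom_triplets a b c → Spec_triplets a b c (triplets a b c)

-- ===== LEMMAS AND PROOFS =====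

theorem bR_mono (xs : List Int) (hxs : xs.Pairwise (· ≤ ·)) (u v : Int) (huv : u ≤ v) :
    PySem.List.bisectRight xs u ≤ PySem.List.bisectRight xs v := by
  by_contra h
  simp only [not_le] at h
  obtain ⟨hleu, hltu, hgtu⟩ := PySem.List.bisectRight_spec xs u hxs
  obtain ⟨hlev, hltv, hgtv⟩ := PySem.List.bisectRight_spec xs v hxs
  have hj : PySem.List.bisectRight xs v < xs.length := lt_of_lt_of_le h hleu
  have h1 := hltu _ hj h
  have h2 := hgtv _ hj (le_refl _)
  linarith

theorem adv_eq (sa : List Int) (hsa : sa.Pairwise (· ≤ ·)) (v : Int) (ai : Nat)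
    (hai : ai ≤ PySem.List.bisectRight sa v) : advA sa v ai = PySem.List.bisectRight sa v := by
  obtain ⟨hle, hlt, hgt⟩ := PySem.List.bisectRight_spec sa v hsa
  suffices h : ∀ n ai, sa.length - ai ≤ n → ai ≤ PySem.List.bisectRight sa v →
      advA sa v ai = PySem.List.bisectRight sa v from h sa.length ai (by omega) hai
  intro n
  induction n with
  | zero =>
      intro ai hn hai2
      have h1 : ¬ ai < sa.length := by omega
      rw [advA, dif_neg h1]
      omega
  | succ n ih =>
      intro ai hn hai2
      rcases eq_or_lt_of_le hai2 with heq | hlt'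
      · rw [advA]
        by_cases h1 : ai < sa.length
        · rw [dif_pos h1, if_neg (not_le.mpr (hgt ai h1 (le_of_eq heq.symm)))]
          exact heq
        · rw [dif_neg h1]
          exact heq
      · have h1 : ai < sa.length := lt_of_lt_of_le hlt' hle
        have h2 : sa[ai] ≤ v := hlt ai h1 hlt'
        rw [advA, dif_pos h1, if_pos h2]
        exact ih (ai + 1) (by omega) hlt'

theorem loopA_eq (sa sc : List Int) (hsa : sa.Pairwise (· ≤ ·)) (hsc : sc.Pairwise (· ≤ ·))
    (bs : List Int) : ∀ (ai ci : Nat) (total : Int),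
      bs.Pairwise (· ≤ ·) →
      (∀ v ∈ bs, ai ≤ PySem.List.bisectRight sa v) →
      (∀ v ∈ bs, ci ≤ PySem.List.bisectRight sc v) →
      loopA sa sc bs ai ci total =
        bs.foldl (fun total v =>
          total + (PySem.List.bisectRight sa v : Int) * (PySem.List.bisectRight sc v : Int)) total := by
  induction bs with
  | nil => intro ai ci total _ _ _; rfl
  | cons v rest ih =>
      intro ai ci total hpw hai hci
      have hav : advA sa v ai = PySem.List.bisectRight sa v :=
        adv_eq sa hsa v ai (hai v (by simp))
      have hcv : advA sc v ci = PySem.List.bisectRight sc v :=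
        adv_eq sc hsc v ci (hci v (by simp))
      have hvle : ∀ u ∈ rest, v ≤ u := (List.pairwise_cons.mp hpw).1
      simp only [loopA, List.foldl_cons, hav, hcv]
      exact ih _ _ _ (List.pairwise_cons.mp hpw).2
        (fun u hu => bR_mono sa hsa v u (hvle u hu))
        (fun u hu => bR_mono sc hsc v u (hvle u hu))

-- ===== VERDICT (by name: the statement is the Claim_ definition above) =====
theorem triplets_spec : Claim_equal_triplets := by
  intro a b c _
  unfold Spec_triplets triplets triplets_alt
  have hsa := (PySem.List.sorted_ofList_pairwise_lt a).imp (fun h => le_of_lt h)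
  have hsb := (PySem.List.sorted_ofList_pairwise_lt b).imp (fun h => le_of_lt h)
  have hsc := (PySem.List.sorted_ofList_pairwise_lt c).imp (fun h => le_of_lt h)
  exact loopA_eq _ _ hsa hsc _ 0 0 0 hsb
    (fun v _ => Nat.zero_le _) (fun v _ => Nat.zero_le _)
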